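-- pv_equiv track=rewrite | github.com/linh-phuong/coursera-ucsd-bioinfo-2 | week4/convolution.py | dict_convolution
-- ===== SOURCE A (Python) =====
-- from collections import defaultdict
--
-- def dict_convolution(exp_spectrum):
--     """find spectral convolution
--
--     Args:
--         exp_spectrum (list): spectrum obtained from experiments
--
--     Returns:
--         dict: spectral convolution
--     """
--     exp_spectrum = sorted(exp_spectrum)
--     c_spectrum = defaultdict(lambda: 0)
--     for s0 in exp_spectrum[1:]:
--         for s1 in exp_spectrum:
--             cs = s0 - s1
--             if cs > 0:
--                 c_spectrum[cs] += 1
--             else: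
--                 break
--     return c_spectrum
-- ===== SOURCE B (Python) =====
-- from collections import Counter, defaultdict
--
--
-- def dict_convolution(exp_spectrum):
--     """find spectral convolution
--
--     Counts, for every positive pairwise difference of the spectrum, how many
--     ordered pairs produce it, by iterating pairs of DISTINCT values and
--     multiplying their multiplicities.
--     """
--     freq = Counter(exp_spectrum)
--     vals = sorted(freq)
--     c_spectrum = defaultdict(lambda: 0)
--     seen = []
--     for v in vals:
--         for u in seen:
--             c_spectrum[v - u] += freq[u] * freq[v]
--         seen.append(v)
--     return c_spectrum
-- ===== Notes on version B (the rewrite author's own statement) =====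
-- stated objective: alternative
-- what changed: B builds a Counter (frequency map) of the spectrum once and iterates over ordered pairs of DISTINCT sorted values, adding freq[u]*freq[v] to the difference's entry, instead of A's scan over all element pairs of the sorted list with a break; with many duplicate masses B does far fewer dict updates.
import Mathlib
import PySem

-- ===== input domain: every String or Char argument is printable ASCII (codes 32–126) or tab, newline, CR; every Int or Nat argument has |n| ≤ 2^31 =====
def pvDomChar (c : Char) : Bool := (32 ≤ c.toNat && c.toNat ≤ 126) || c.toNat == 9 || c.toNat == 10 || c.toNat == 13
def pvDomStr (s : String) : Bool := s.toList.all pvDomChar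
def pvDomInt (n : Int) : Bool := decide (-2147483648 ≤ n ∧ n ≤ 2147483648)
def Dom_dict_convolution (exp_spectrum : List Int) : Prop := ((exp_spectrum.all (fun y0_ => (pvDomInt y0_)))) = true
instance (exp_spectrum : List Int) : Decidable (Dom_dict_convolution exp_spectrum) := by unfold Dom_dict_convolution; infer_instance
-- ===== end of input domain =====

-- B rewrites A's all-pairs scan with break as a loop over pairs of DISTINCT sorted values
-- weighted by their multiplicities (Counter); same returned dict (items in the same order).

-- ===== PORT A =====
-- inner 'for s1 in exp_spectrum: … else: break' loop of A
def dcInnerA (s0 : Int) : List Int → PySem.Dict Int Int → PySem.Dict Int Int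
  | [], d => d
  | s1 :: rest, d =>
    let cs := s0 - s1
    if 0 < cs then dcInnerA s0 rest (d.insert cs (d.getD cs 0 + 1)) else d

def dict_convolution (exp_spectrum : List Int) : List (Int × Int) :=
  let sp := PySem.List.sorted exp_spectrum (fun x => x) false
  ((PySem.List.slice sp (some 1) none).foldl (fun d s0 => dcInnerA s0 sp d) PySem.Dict.empty).items

-- ===== PORT B =====
def dict_convolution_alt (exp_spectrum : List Int) : List (Int × Int) :=
  let freq := PySem.Dict.counter exp_spectrum
  let vals := PySem.List.sorted freq.keys (fun x => x) false
  (vals.foldl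
    (fun (st : PySem.Dict Int Int × List Int) v =>
      (st.2.foldl
        (fun d u => d.insert (v - u) (d.getD (v - u) 0 + freq.getD u 0 * freq.getD v 0)) st.1,
       st.2 ++ [v]))
    (PySem.Dict.empty, ([] : List Int))).1.items

-- ===== PRECONDITION & SPEC =====
def Spec_dict_convolution (exp_spectrum : List Int) (out : List (Int × Int)) : Prop := out = dict_convolution_alt exp_spectrum
instance (exp_spectrum : List Int) (out : List (Int × Int)) : Decidable (Spec_dict_convolution exp_spectrum out) := by unfold Spec_dict_convolution; infer_instance

-- ===== CLAIM (what is proved, stated in full; the proofs are below) =====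
def Claim_equal_dict_convolution : Prop := ∀ (exp_spectrum : List Int), Dom_dict_convolution exp_spectrum → Spec_dict_convolution exp_spectrum (dict_convolution exp_spectrum)

-- ===== LEMMAS AND PROOFS =====
def pvBump (d : PySem.Dict Int Int) (p : Int × Int) : PySem.Dict Int Int :=
  d.insert p.1 (d.getD p.1 0 + p.2)
def pvKeySum (ev : List (Int × Int)) (k : Int) : Int :=
  ((ev.filter (fun p => p.1 == k)).map Prod.snd).sum

theorem pvKeySum_append (a b : List (Int × Int)) (k : Int) :
    pvKeySum (a ++ b) k = pvKeySum a k + pvKeySum b k := by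
  simp [pvKeySum, List.filter_append]

theorem getD_bumpFold (ev : List (Int × Int)) (d : PySem.Dict Int Int) (k : Int) :
    (ev.foldl pvBump d).getD k 0 = d.getD k 0 + pvKeySum ev k := by
  induction ev generalizing d with
  | nil => simp [pvKeySum]
  | cons p rest ih =>
    simp only [List.foldl_cons, ih, pvBump, pvKeySum, List.filter_cons]
    rw [PySem.Dict.getD_insert]
    by_cases h : k = p.1
    · simp [h]; ring
    · rw [if_neg h]
      simp only [beq_iff_eq]
      rw [if_neg (fun hh => h (Eq.symm hh))]

theorem keys_bumpFold (ev : List (Int × Int)) (d : PySem.Dict Int Int) :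
    (ev.foldl pvBump d).keys = PySem.Set.update d.keys (ev.map Prod.fst) := by
  exact PySem.Dict.keys_foldl_insert_key ev Prod.fst (fun d p => d.getD p.1 0 + p.2) d

theorem nodup_keys_bumpFold (ev : List (Int × Int)) (d : PySem.Dict Int Int)
    (h : d.keys.Nodup) : (ev.foldl pvBump d).keys.Nodup := by
  exact PySem.Dict.nodup_keys_foldl_insert_key ev Prod.fst (fun d p => d.getD p.1 0 + p.2) d h

theorem items_bumpFold (ev : List (Int × Int)) :
    (ev.foldl pvBump PySem.Dict.empty).items
      = (PySem.List.dedup (ev.map Prod.fst)).map (fun k => (k, pvKeySum ev k)) := by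
  rw [PySem.Dict.items_eq_map_keys _ (nodup_keys_bumpFold ev _ (by simp [PySem.Dict.keys_empty])) 0]
  rw [keys_bumpFold]
  simp [PySem.Set.update_nil_left, PySem.Dict.keys_empty]
  intro a x _
  rw [getD_bumpFold]
  simp [PySem.Dict.getD_empty]

-- event list of A's outer loop over 'rest', inner scans 'sp'
def pvEvA (sp rest : List Int) : List (Int × Int) :=
  rest.flatMap (fun s0 =>
    (sp.takeWhile (fun s1 => decide (0 < s0 - s1))).map (fun s1 => (s0 - s1, (1 : Int))))

theorem dcInnerA_ev (s0 : Int) (xs : List Int) (d : PySem.Dict Int Int) :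
    dcInnerA s0 xs d
      = ((xs.takeWhile (fun s1 => decide (0 < s0 - s1))).map
          (fun s1 => (s0 - s1, (1 : Int)))).foldl pvBump d := by
  induction xs generalizing d with
  | nil => rfl
  | cons x xs ih =>
    show (if 0 < s0 - x then dcInnerA s0 xs (d.insert (s0 - x) (d.getD (s0 - x) 0 + 1)) else d) = _
    by_cases h : 0 < s0 - x
    · rw [if_pos h, List.takeWhile_cons_of_pos (by simpa using h)]
      simp only [List.map_cons, List.foldl_cons]
      exact ih _
    · rw [if_neg h, List.takeWhile_cons_of_neg (by simpa using h)]
      rfl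

theorem foldA_ev (sp rest : List Int) (d : PySem.Dict Int Int) :
    rest.foldl (fun d s0 => dcInnerA s0 sp d) d = (pvEvA sp rest).foldl pvBump d := by
  induction rest generalizing d with
  | nil => rfl
  | cons r rest ih =>
    simp only [List.foldl_cons]
    rw [ih, dcInnerA_ev]
    simp only [pvEvA, List.flatMap_cons, List.foldl_append]

-- event list of B's loop: pairs (v - u, freq u * freq v) with u in 'seen' before v
def pvEvB (freq : PySem.Dict Int Int) : List Int → List Int → List (Int × Int)
  | _, [] => []
  | seen, v :: rest =>
    seen.map (fun u => (v - u, freq.getD u 0 * freq.getD v 0)) ++ pvEvB freq (seen ++ [v]) rest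

theorem foldB_ev (freq : PySem.Dict Int Int) (vals seen : List Int) (d : PySem.Dict Int Int) :
    (vals.foldl
      (fun (st : PySem.Dict Int Int × List Int) v =>
        (st.2.foldl
          (fun d u => d.insert (v - u) (d.getD (v - u) 0 + freq.getD u 0 * freq.getD v 0)) st.1,
         st.2 ++ [v])) (d, seen)).1
      = (pvEvB freq seen vals).foldl pvBump d := by
  induction vals generalizing seen d with
  | nil => rfl
  | cons v vals ih =>
    simp only [List.foldl_cons, pvEvB, List.foldl_append, ih]
    congr 1
    rw [List.foldl_map]
    rfl

-- the sorted spectrum is the strictly increasing distinct values, each replicated by its count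
theorem count_flat (l vals : List Int) (hnd : vals.Nodup) (x : Int) :
    (vals.flatMap (fun v => List.replicate (l.count v) v)).count x
      = if x ∈ vals then l.count x else 0 := by
  induction vals with
  | nil => simp
  | cons v vs ih =>
    have hv : v ∉ vs := (List.nodup_cons.mp hnd).1
    simp only [List.flatMap_cons, List.count_append, List.count_replicate,
      ih (List.nodup_cons.mp hnd).2, List.mem_cons]
    by_cases h : x = v
    · subst h
      simp [hv]
    · have h' : ¬ v = x := fun hh => h hh.symm
      simp [h, h']

theorem pairwise_le_flat (l vals : List Int) (h : vals.Pairwise (· < ·)) :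
    (vals.flatMap (fun v => List.replicate (l.count v) v)).Pairwise (· ≤ ·) := by
  induction vals with
  | nil => simp
  | cons v vs ih =>
    simp only [List.flatMap_cons, List.pairwise_append]
    refine ⟨?_, ih h.of_cons, ?_⟩
    · rw [List.pairwise_replicate]
      right; exact le_refl v
    · intro a ha b hb
      have hav : a = v := List.eq_of_mem_replicate ha
      obtain ⟨u, hu, hbu⟩ := List.mem_flatMap.mp hb
      have hbv : b = u := List.eq_of_mem_replicate hbu
      subst hav hbv
      exact le_of_lt (List.rel_of_pairwise_cons h hu)

theorem sorted_eq_flat (l : List Int) :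
    PySem.List.sorted l (fun x => x) false
      = (PySem.List.sorted (PySem.Set.ofList l) (fun x => x) false).flatMap
          (fun v => List.replicate (l.count v) v) := by
  have hvnd : (PySem.List.sorted (PySem.Set.ofList l) (fun x => x) false).Nodup := by
    have := PySem.Set.nodup_ofList (xs := l)
    exact (PySem.List.sorted_perm _ _ _).nodup_iff.mpr this
  apply PySem.List.sorted_id_eq_of_perm_of_pairwise
  · rw [List.perm_iff_count]
    intro x
    rw [count_flat l _ hvnd x]
    by_cases h : x ∈ l
    · rw [if_pos]
      rw [PySem.List.mem_sorted]
      exact (PySem.Set.mem_ofList _ _).mpr h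
    · rw [if_neg, Eq.comm, List.count_eq_zero]
      · exact h
      · rw [PySem.List.mem_sorted, PySem.Set.mem_ofList]
        exact h
  · exact pairwise_le_flat l _ (PySem.List.sorted_ofList_pairwise_lt l)

theorem takeWhile_flat (l : List Int) (pre post : List Int) (v : Int)
    (hlt : ∀ u ∈ pre, u < v) (hcv : 0 < l.count v) :
    ((pre ++ v :: post).flatMap (fun u => List.replicate (l.count u) u)).takeWhile
        (fun s1 => decide (0 < v - s1))
      = pre.flatMap (fun u => List.replicate (l.count u) u) := by
  rw [List.flatMap_append]
  rw [List.takeWhile_append_of_pos]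
  · rw [List.flatMap_cons]
    cases hc : l.count v with
    | zero => omega
    | succ m =>
      rw [List.replicate_succ, List.cons_append,
        List.takeWhile_cons_of_neg (p := fun s1 => decide (0 < v - s1)) (by simp)]
      simp
  · intro x hx
    obtain ⟨u, hu, hxu⟩ := List.mem_flatMap.mp hx
    have : x = u := List.eq_of_mem_replicate hxu
    subst this
    have := hlt x hu
    simp only [decide_eq_true_eq]
    omega

-- A's events regrouped over distinct values: for each copy of v, one block over all copies of earlier values
def pvEvA' (c : Int → Nat) : List Int → List Int → List (Int × Int)
  | _, [] => []
  | seen, v :: rest =>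
    (List.replicate (c v)
        ((seen.flatMap (fun u => List.replicate (c u) u)).map (fun u => (v - u, (1 : Int))))).flatten
      ++ pvEvA' c (seen ++ [v]) rest

theorem evA_eq (l vals : List Int) (hs : vals.Pairwise (· < ·))
    (hpos : ∀ u ∈ vals, 0 < l.count u) :
    ∀ rest seen, vals = seen ++ rest →
    pvEvA (vals.flatMap (fun u => List.replicate (l.count u) u))
        (rest.flatMap (fun u => List.replicate (l.count u) u))
      = pvEvA' (fun u => l.count u) seen rest := by
  intro rest
  induction rest with
  | nil => intro seen h; rfl
  | cons v rest ih =>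
    intro seen h
    simp only [List.flatMap_cons, pvEvA, List.flatMap_append, pvEvA']
    have hblock :
        ((vals.flatMap (fun u => List.replicate (l.count u) u)).takeWhile
            (fun s1 => decide (0 < v - s1)))
          = seen.flatMap (fun u => List.replicate (l.count u) u) := by
      rw [h]
      apply takeWhile_flat
      · intro u hu
        have := (List.pairwise_append.mp (h ▸ hs)).2.2
        exact this u hu v (List.mem_cons_self)
      · exact hpos v (by rw [h]; simp)
    congr 1
    · rw [List.flatMap_replicate]
      congr 1
      rw [hblock]
    · have := ih (seen ++ [v]) (by rw [h]; simp)
      simpa [pvEvA] using this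

theorem update_update_self (s : PySem.Set Int) (xs : List Int) :
    PySem.Set.update (PySem.Set.update s xs) xs = PySem.Set.update s xs := by
  rw [PySem.Set.update_eq_append_filter (PySem.Set.update s xs) xs]
  rw [List.filter_eq_nil_iff.mpr, List.append_nil]
  intro y hy
  have hy' : y ∈ xs := (PySem.Set.mem_ofList _ _).mp hy
  simp [PySem.Set.mem_update, hy']

theorem update_replicate (s : PySem.Set Int) (x : Int) (n : Nat) :
    PySem.Set.update s (List.replicate (n + 1) x) = PySem.Set.add s x := by
  induction n generalizing s with
  | zero => rfl
  | succ m ih =>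
    rw [List.replicate_succ, PySem.Set.update_cons, ih,
      PySem.Set.add_of_mem (by rw [PySem.Set.mem_add]; right; rfl)]

theorem update_flatten_replicate (s : PySem.Set Int) (blk : List Int) (n : Nat) :
    PySem.Set.update s (List.replicate (n + 1) blk).flatten = PySem.Set.update s blk := by
  induction n generalizing s with
  | zero => simp
  | succ m ih =>
    rw [List.replicate_succ, List.flatten_cons, PySem.Set.update_append, ih, update_update_self]

theorem update_map_flat (s : PySem.Set Int) (c : Int → Nat) (f : Int → Int) (seen : List Int)
    (hpos : ∀ u ∈ seen, 0 < c u) :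
    PySem.Set.update s ((seen.flatMap (fun u => List.replicate (c u) u)).map f)
      = PySem.Set.update s (seen.map f) := by
  induction seen generalizing s with
  | nil => rfl
  | cons u seen ih =>
    obtain ⟨m, hm⟩ : ∃ m, c u = m + 1 := by
      have := hpos u (by simp); exact ⟨c u - 1, by omega⟩
    rw [List.flatMap_cons, List.map_append, PySem.Set.update_append, List.map_replicate, hm,
      update_replicate, List.map_cons, PySem.Set.update_cons,
      ih _ (fun w hw => hpos w (by simp [hw]))]

theorem keys_evAB (c : Int → Nat) (freq : PySem.Dict Int Int) :
    ∀ (rest seen : List Int) (s : PySem.Set Int),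
      (∀ u ∈ seen, 0 < c u) → (∀ u ∈ rest, 0 < c u) →
      PySem.Set.update s ((pvEvA' c seen rest).map Prod.fst)
        = PySem.Set.update s ((pvEvB freq seen rest).map Prod.fst) := by
  intro rest
  induction rest with
  | nil => intro seen s _ _; rfl
  | cons v rest ih =>
    intro seen s hseen hrest
    obtain ⟨m, hm⟩ : ∃ m, c v = m + 1 := by
      have := hrest v (by simp); exact ⟨c v - 1, by omega⟩
    simp only [pvEvA', pvEvB, List.map_append, PySem.Set.update_append]
    rw [List.map_flatten, List.map_replicate, List.map_map, hm, update_flatten_replicate]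
    have hAkeys :
        PySem.Set.update s
            ((seen.flatMap (fun u => List.replicate (c u) u)).map (Prod.fst ∘ fun u => (v - u, (1 : Int))))
          = PySem.Set.update s (seen.map (fun u => v - u)) := by
      exact update_map_flat s c (fun u => v - u) seen hseen
    rw [hAkeys, List.map_map]
    have hBkeys : (Prod.fst ∘ fun u => (v - u, freq.getD u 0 * freq.getD v 0)) = fun u => v - u := rfl
    rw [hBkeys]
    exact ih (seen ++ [v]) _
      (by intro u hu; rcases List.mem_append.mp hu with h | h
          · exact hseen u h
          · simp at h; subst h; omega)
      (fun u hu => hrest u (by simp [hu]))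

theorem pvKeySum_cons (p : Int × Int) (ev : List (Int × Int)) (k : Int) :
    pvKeySum (p :: ev) k = (if p.1 = k then p.2 else 0) + pvKeySum ev k := by
  simp only [pvKeySum, List.filter_cons]
  by_cases h : p.1 = k
  · simp [h]
  · simp [h]

theorem pvKeySum_flatten_replicate (n : Nat) (blk : List (Int × Int)) (k : Int) :
    pvKeySum (List.replicate n blk).flatten k = (n : Int) * pvKeySum blk k := by
  induction n with
  | zero => simp [pvKeySum]
  | succ m ih =>
    rw [List.replicate_succ, List.flatten_cons, pvKeySum_append, ih]
    push_cast
    ring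

theorem pvKeySum_map_pairs (f g : Int → Int) (us : List Int) (k : Int) :
    pvKeySum (us.map (fun u => (f u, g u))) k
      = (us.map (fun u => if f u = k then g u else 0)).sum := by
  induction us with
  | nil => rfl
  | cons u us ih => rw [List.map_cons, pvKeySum_cons, List.map_cons, List.sum_cons, ih]

theorem pvKeySum_flat_ones (c : Int → Nat) (v k : Int) (seen : List Int) :
    pvKeySum ((seen.flatMap (fun u => List.replicate (c u) u)).map (fun u => (v - u, (1 : Int)))) k
      = (seen.map (fun u => if v - u = k then (c u : Int) else 0)).sum := by
  induction seen with
  | nil => rfl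
  | cons u us ih =>
    rw [List.flatMap_cons, List.map_append, pvKeySum_append, ih, List.map_replicate,
      List.map_cons, List.sum_cons]
    congr 1
    induction c u with
    | zero => simp [pvKeySum]
    | succ m ih2 =>
      rw [List.replicate_succ, pvKeySum_cons, ih2]
      by_cases h : v - u = k
      · simp [h]; ring
      · simp [h]

theorem sum_evAB (c : Int → Nat) (freq : PySem.Dict Int Int)
    (hfreq : ∀ u : Int, freq.getD u 0 = (c u : Int)) :
    ∀ (rest seen : List Int) (k : Int),
      pvKeySum (pvEvA' c seen rest) k = pvKeySum (pvEvB freq seen rest) k := by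
  intro rest
  induction rest with
  | nil => intro seen k; rfl
  | cons v rest ih =>
    intro seen k
    simp only [pvEvA', pvEvB]
    rw [pvKeySum_append, pvKeySum_append, ih (seen ++ [v]) k]
    congr 1
    rw [pvKeySum_flatten_replicate, pvKeySum_flat_ones]
    have hB : pvKeySum (seen.map (fun u => (v - u, freq.getD u 0 * freq.getD v 0))) k
        = (seen.map (fun u => if v - u = k then (c u : Int) * (c v : Int) else 0)).sum := by
      rw [pvKeySum_map_pairs]
      apply congrArg
      apply List.map_congr_left
      intro u _
      rw [hfreq u, hfreq v]
    rw [hB, ← List.sum_map_mul_left]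
    apply congrArg
    apply List.map_congr_left
    intro u _
    by_cases h : v - u = k
    · simp [h]; ring
    · simp [h]

theorem pvEvA_tail (sp : List Int) (x : Int) (t : List Int) (hsp : sp = x :: t) :
    pvEvA sp t = pvEvA sp sp := by
  conv_rhs => rw [hsp]
  simp only [pvEvA, List.flatMap_cons]
  rw [hsp, List.takeWhile_cons_of_neg (by simp)]
  simp

-- ===== VERDICT (by name: the statement is the Claim_ definition above) =====
theorem dict_convolution_spec : Claim_equal_dict_convolution := by
  unfold Claim_equal_dict_convolution
  intro l _
  unfold Spec_dict_convolution
  by_cases hl : l = []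
  · subst hl; rfl
  simp only [dict_convolution, dict_convolution_alt]
  rw [foldB_ev, PySem.List.slice_from_one, foldA_ev]
  have hkeys : (PySem.Dict.counter l).keys = PySem.Set.ofList l := PySem.Dict.keys_counter l
  rw [hkeys]
  have hvals := PySem.List.sorted_ofList_pairwise_lt l
  have hmem : ∀ u ∈ PySem.List.sorted (PySem.Set.ofList l) (fun x => x) false, u ∈ l := by
    intro u hu
    rw [PySem.List.mem_sorted] at hu
    exact (PySem.Set.mem_ofList _ _).mp hu
  have hpos : ∀ u ∈ PySem.List.sorted (PySem.Set.ofList l) (fun x => x) false, 0 < l.count u :=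
    fun u hu => List.count_pos_iff.mpr (hmem u hu)
  have hsp := sorted_eq_flat l
  have hne : PySem.List.sorted l (fun x => x) false ≠ [] := by
    rw [Ne, PySem.List.sorted_eq_nil_iff]; exact hl
  obtain ⟨x, t, hxt⟩ := List.exists_cons_of_ne_nil hne
  have hA : pvEvA (PySem.List.sorted l (fun x => x) false)
      (PySem.List.sorted l (fun x => x) false).tail
      = pvEvA' (fun u => l.count u) [] (PySem.List.sorted (PySem.Set.ofList l) (fun x => x) false) := by
    rw [show (PySem.List.sorted l (fun x => x) false).tail = t from by rw [hxt, List.tail_cons]]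
    rw [pvEvA_tail _ x t hxt]
    conv_lhs => rw [hsp]
    exact evA_eq l _ hvals hpos _ [] rfl
  rw [hA, items_bumpFold, items_bumpFold]
  have hdedup :
      PySem.List.dedup ((pvEvA' (fun u => l.count u) []
          (PySem.List.sorted (PySem.Set.ofList l) (fun x => x) false)).map Prod.fst)
        = PySem.List.dedup ((pvEvB (PySem.Dict.counter l) []
          (PySem.List.sorted (PySem.Set.ofList l) (fun x => x) false)).map Prod.fst) := by
    rw [PySem.List.dedup_eq_ofList, PySem.List.dedup_eq_ofList,
      ← PySem.Set.update_nil_left, ← PySem.Set.update_nil_left]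
    exact keys_evAB _ _ _ [] [] (by simp) hpos
  rw [hdedup]
  apply List.map_congr_left
  intro k _
  exact congrArg (fun z => (k, z))
    (sum_evAB (fun u => l.count u) (PySem.Dict.counter l)
      (fun u => PySem.Dict.getD_counter l u) _ [] k)
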